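-- pv_equiv track=rewrite | github.com/ariuk44/retake_exam_prep | day_12.py | isBean1
-- ===== SOURCE A (Python) =====
-- def isBean1(arr):
--     n = len(arr)
--     for i in range(n):
--         found = 0
--         for j in range(n):
--             if arr[i] + 1 == arr[j] or arr[i] - 1 == arr[j]:
--                 found = 1
--                 break
--         if found == 0:
--             return 0
--     return 1
-- ===== SOURCE B (Python) =====
-- def isBean1(arr):
--     # Sort the distinct values; in strictly increasing order the only candidate
--     # for u[k] +/- 1 is the adjacent entry, so one linear adjacency pass suffices.
--     u = sorted(set(arr))
--     prev_adj = False
--     for k in range(len(u)):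
--         next_adj = k + 1 < len(u) and u[k + 1] == u[k] + 1
--         if not (prev_adj or next_adj):
--             return 0
--         prev_adj = next_adj
--     return 1
-- ===== Notes on version B (the rewrite author's own statement) =====
-- stated objective: alternative
-- what changed: Replaces A's nested all-pairs scan with sort-the-distinct-values and a single adjacent-difference pass carrying a previous-adjacency flag.
import Mathlib
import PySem

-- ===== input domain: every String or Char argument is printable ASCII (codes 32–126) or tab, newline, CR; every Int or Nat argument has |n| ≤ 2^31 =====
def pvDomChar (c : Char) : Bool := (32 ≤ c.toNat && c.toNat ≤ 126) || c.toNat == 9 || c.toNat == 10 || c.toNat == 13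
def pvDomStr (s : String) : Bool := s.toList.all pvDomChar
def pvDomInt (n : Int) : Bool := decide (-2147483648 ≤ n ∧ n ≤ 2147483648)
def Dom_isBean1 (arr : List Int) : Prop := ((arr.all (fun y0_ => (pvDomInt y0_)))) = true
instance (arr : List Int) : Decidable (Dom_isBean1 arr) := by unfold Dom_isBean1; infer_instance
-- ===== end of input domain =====

-- B sorts the distinct values and makes one adjacent-difference pass instead of A's nested scan (alternative algorithm).

-- ===== PORT A =====
-- inner 'for j' loop of A: scans arr for a ±1 neighbour of x, breaking on the first hit
def isBean1Inner (x : Int) : List Int → Int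
  | [] => 0
  | y :: ys => if x + 1 = y ∨ x - 1 = y then 1 else isBean1Inner x ys

-- outer 'for i' loop of A: early-returns 0 when no neighbour is found
def isBean1Outer (arr : List Int) : List Int → Int
  | [] => 1
  | x :: xs => if isBean1Inner x arr = 0 then 0 else isBean1Outer arr xs

def isBean1 (arr : List Int) : Int := isBean1Outer arr arr

-- ===== PORT B =====
-- B's 'for k in range(len(u))' pass over sorted(set(arr)), carrying the prev_adj flag
def isBean1AltLoop : Bool → List Int → Int
  | _, [] => 1
  | prevAdj, x :: xs =>
      let nextAdj := match xs with | [] => false | y :: _ => y == x + 1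
      if !(prevAdj || nextAdj) then 0 else isBean1AltLoop nextAdj xs

def isBean1_alt (arr : List Int) : Int :=
  let u := PySem.List.sorted (PySem.Set.ofList arr) (fun x => x) false
  isBean1AltLoop false u

-- ===== PRECONDITION & SPEC =====
def Spec_isBean1 (arr : List Int) (out : Int) : Prop := out = isBean1_alt arr
instance (arr : List Int) (out : Int) : Decidable (Spec_isBean1 arr out) := by unfold Spec_isBean1; infer_instance

-- ===== CLAIM (what is proved, stated in full; the proofs are below) =====
def Claim_equal_isBean1 : Prop := ∀ (arr : List Int), Dom_isBean1 arr → Spec_isBean1 arr (isBean1 arr)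

-- ===== LEMMAS AND PROOFS =====
lemma inner_eq (x : Int) (l : List Int) :
    isBean1Inner x l = if (x + 1) ∈ l ∨ (x - 1) ∈ l then 1 else 0 := by
  induction l with
  | nil => simp [isBean1Inner]
  | cons y ys ih =>
      by_cases h : x + 1 = y ∨ x - 1 = y
      · simp [isBean1Inner, h]
        rcases h with h | h <;> simp [← h]
      · push Not at h
        simp [isBean1Inner, h.1, h.2, ih, List.mem_cons]

lemma outer_eq (arr l : List Int) :
    isBean1Outer arr l = if ∀ x ∈ l, (x + 1) ∈ arr ∨ (x - 1) ∈ arr then 1 else 0 := by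
  induction l with
  | nil => simp [isBean1Outer]
  | cons x xs ih =>
      by_cases h : (x + 1) ∈ arr ∨ (x - 1) ∈ arr
      · simp [isBean1Outer, inner_eq, h, ih]
      · simp [isBean1Outer, inner_eq, h]

-- On a strictly increasing list, the adjacency pass decides "prev-link or both-sided ±1 membership".
lemma altLoop_eq (xs : List Int) : ∀ (x : Int), (x :: xs).Pairwise (· < ·) → ∀ (prev : Bool),
    isBean1AltLoop prev (x :: xs) =
      if (prev = true ∨ (x + 1) ∈ x :: xs) ∧ (∀ y ∈ xs, (y + 1) ∈ x :: xs ∨ (y - 1) ∈ x :: xs) then 1 else 0 := by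
  induction xs with
  | nil =>
      intro x _ prev
      have hxx : ((x + 1) ∈ [x]) ↔ False := by
        simp only [List.mem_singleton, iff_false]; omega
      cases prev <;> simp [isBean1AltLoop, hxx]
  | cons y ys ih =>
      intro x hs prev
      have hxy : x < y := (List.pairwise_cons.1 hs).1 y (by simp)
      have hys : ∀ z ∈ ys, y < z := (List.pairwise_cons.1 (List.pairwise_cons.1 hs).2).1
      have htail : (y :: ys).Pairwise (· < ·) := (List.pairwise_cons.1 hs).2
      -- x+1 is in the list iff it is y
      have hb_iff : ((x + 1) ∈ x :: y :: ys) ↔ y = x + 1 := by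
        simp only [List.mem_cons]
        constructor
        · rintro (h | h | h)
          · omega
          · omega
          · have := hys _ h; omega
        · intro h; right; left; omega
      -- y-1 is in the full list iff it is x
      have hym1 : ((y - 1) ∈ x :: y :: ys) ↔ y = x + 1 := by
        simp only [List.mem_cons]
        constructor
        · rintro (h | h | h)
          · omega
          · omega
          · have := hys _ h; omega
        · intro h; left; omega
      -- memberships of y+1 and of z±1 (z ∈ ys) never hit the head x
      have hyp1 : ((y + 1) ∈ x :: y :: ys) ↔ (y + 1) ∈ y :: ys := by
        simp only [List.mem_cons]
        have hne : ¬ (y + 1 = x) := by omega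
        tauto
      have hzs : (∀ z ∈ ys, (z + 1) ∈ x :: y :: ys ∨ (z - 1) ∈ x :: y :: ys) ↔
                 (∀ z ∈ ys, (z + 1) ∈ y :: ys ∨ (z - 1) ∈ y :: ys) := by
        refine forall₂_congr (fun z hz => ?_)
        have h1 := hys z hz
        have n1 : ¬ (z + 1 = x) := by omega
        have n2 : ¬ (z - 1 = x) := by omega
        simp only [List.mem_cons]
        tauto
      have hrhs : ((prev = true ∨ (x + 1) ∈ x :: y :: ys) ∧
                    (∀ z ∈ y :: ys, (z + 1) ∈ x :: y :: ys ∨ (z - 1) ∈ x :: y :: ys))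
          ↔ ((prev || (y == x + 1)) = true ∧
              (((y == x + 1) = true ∨ (y + 1) ∈ y :: ys) ∧
                ∀ z ∈ ys, (z + 1) ∈ y :: ys ∨ (z - 1) ∈ y :: ys)) := by
        simp only [List.forall_mem_cons, hb_iff, hym1, hyp1, hzs, Bool.or_eq_true, beq_iff_eq]
        tauto
      rw [if_congr hrhs rfl rfl]
      show (if !(prev || (y == x + 1)) then 0 else isBean1AltLoop (y == x + 1) (y :: ys)) = _
      rw [ih y htail]
      cases h : (prev || (y == x + 1))
      · simp
      · simp [h]

-- ===== VERDICT (by name: the statement is the Claim_ definition above) =====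
theorem isBean1_spec : Claim_equal_isBean1 := by
  intro arr _
  unfold Spec_isBean1 isBean1 isBean1_alt
  rw [outer_eq]
  cases hu : PySem.List.sorted (PySem.Set.ofList arr) (fun x => x) false with
  | nil =>
      have hof : PySem.Set.ofList arr = [] := (PySem.List.sorted_eq_nil_iff _ _ _).1 hu
      have : arr = [] := by
        cases arr with
        | nil => rfl
        | cons a as =>
            have hm : a ∈ PySem.Set.ofList (a :: as) := (PySem.Set.mem_ofList _ _).2 (by simp)
            rw [hof] at hm
            exact absurd hm (by simp)
      simp [this, isBean1AltLoop]
  | cons x xs =>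
      have hmem : ∀ z : Int, z ∈ x :: xs ↔ z ∈ arr := by
        intro z
        rw [← hu, PySem.List.mem_sorted, PySem.Set.mem_ofList]
      have hsorted : (x :: xs).Pairwise (· < ·) := by
        rw [← hu]; exact PySem.List.sorted_ofList_pairwise_lt arr
      rw [altLoop_eq xs x hsorted false]
      have hxmin : ∀ z ∈ x :: xs, x ≤ z := by
        intro z hz
        rcases List.mem_cons.1 hz with h | h
        · omega
        · exact le_of_lt ((List.pairwise_cons.1 hsorted).1 z h)
      have hxm1 : (x - 1) ∉ arr := by
        intro hc
        have := hxmin (x - 1) ((hmem _).2 hc)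
        omega
      by_cases hgood : ∀ z ∈ arr, (z + 1) ∈ arr ∨ (z - 1) ∈ arr
      · have h1 : (x + 1) ∈ x :: xs := by
          rcases hgood x ((hmem x).1 (by simp)) with h | h
          · exact (hmem _).2 h
          · exact absurd h hxm1
        have h2 : ∀ y ∈ xs, (y + 1) ∈ x :: xs ∨ (y - 1) ∈ x :: xs := by
          intro y hy
          rcases hgood y ((hmem y).1 (by simp [hy])) with h | h
          · exact Or.inl ((hmem _).2 h)
          · exact Or.inr ((hmem _).2 h)
        rw [if_pos hgood, if_pos ⟨Or.inr h1, h2⟩]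
      · have hcond : ¬ (((false : Bool) = true ∨ (x + 1) ∈ x :: xs) ∧
            ∀ y ∈ xs, (y + 1) ∈ x :: xs ∨ (y - 1) ∈ x :: xs) := by
          rintro ⟨hh, ht⟩
          apply hgood
          intro z hz
          rcases List.mem_cons.1 ((hmem z).2 hz) with h | h
          · subst h
            rcases hh with h | h
            · exact absurd h (by simp)
            · exact Or.inl ((hmem _).1 h)
          · rcases ht z h with hq | hq
            · exact Or.inl ((hmem _).1 hq)
            · exact Or.inr ((hmem _).1 hq)
        rw [if_neg hgood, if_neg hcond]
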